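-- pv_equiv track=rewrite | github.com/zhiqiuli/Lintcode | 743-Monotone-Increasing-Digits.py | monotone_digits
-- ===== SOURCE A (Python) =====
-- def monotone_digits(num: int) -> int:
--     digits = [0] * 10
--     cnt = 0
--     # 87 -> 7, 8
--     while num != 0:
--         digits[cnt] = num % 10
--         cnt += 1
--         num //= 10
--
--     for i in range(1, cnt):
--         # 7, 8
--         if digits[i] > digits[i-1]:
--             # as 7 < 8 -> 8 - 1 = 7 -> 7, 7
--             digits[i] -= 1
--             # 7, 7 -> 9, 7
--             for k in range(i):
--                 digits[k] = 9
--
--     ans = 0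
--     for i in range(cnt-1, -1, -1):
--         ans = 10 * ans + digits[i]
--
--     return ans
-- ===== SOURCE B (Python) =====
-- def monotone_digits(num: int) -> int:
--     # Pure-arithmetic rewrite: no digit array, no nine-fill inner loop.
--     # Scan place values upward; on a violation truncate-and-decrement, which
--     # makes all lower digits 9 in one arithmetic step.
--     x = num
--     p = 1
--     while x // p // 10 > 0:
--         if (x // p) % 10 < (x // p // 10) % 10:
--             x = x // (p * 10) * (p * 10) - 1
--         p *= 10
--     return x
-- ===== Notes on version B (the rewrite author's own statement) =====
-- stated objective: simpler
-- what changed: B replaces A's digit array, its bottom-up violation pass with an inner nine-fill loop, and the reconstruction loop by a single pure-arithmetic scan over place values p=1,10,100,...: on a violation it truncates-and-decrements (x = x//(10p)*(10p)-1), which makes all lower digits 9 in one step, so no list and no inner loop exist.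
import Mathlib
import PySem

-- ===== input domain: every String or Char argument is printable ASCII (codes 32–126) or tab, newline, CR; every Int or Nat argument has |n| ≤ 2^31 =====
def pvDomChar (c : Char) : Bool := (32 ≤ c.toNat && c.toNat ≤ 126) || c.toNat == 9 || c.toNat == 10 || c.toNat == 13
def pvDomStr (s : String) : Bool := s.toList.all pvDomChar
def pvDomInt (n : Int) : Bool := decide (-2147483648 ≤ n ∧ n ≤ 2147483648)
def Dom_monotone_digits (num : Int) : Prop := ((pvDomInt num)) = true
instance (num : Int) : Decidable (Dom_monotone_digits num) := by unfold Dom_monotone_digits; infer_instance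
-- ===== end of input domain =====

-- B replaces A's digit array and nine-fill inner loop by one pure-arithmetic scan
-- over place values (objective: simpler; return value only, no observable mutation).

-- ===== PORT A =====
-- 'while num != 0: digits[cnt] = num % 10; cnt += 1; num //= 10'
-- fuel 11: within Dom (|num| ≤ 2^31 < 10^10) a non-negative num has ≤ 10 digits, so
-- the loop ends with num = 0 before the fuel runs out; on negative num Python loops
-- until digits[10] raises IndexError (excluded by Pre_).
def aExtract : Nat → Int → List Int → Int → List Int × Int
  | 0, _, ds, cnt => (ds, cnt)
  | f + 1, num, ds, cnt =>
    if num ≠ 0 then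
      aExtract f (PySem.Int.floordiv num 10)
        (PySem.List.pySetD ds cnt (PySem.Int.mod num 10)) (cnt + 1)
    else (ds, cnt)

-- body of 'for i in range(1, cnt)'; indices are in range within Dom ∧ Pre_
def aStep (ds : List Int) (i : Int) : List Int :=
  if PySem.List.pyGetD ds i 0 > PySem.List.pyGetD ds (i - 1) 0 then
    let ds1 := PySem.List.pySetD ds i (PySem.List.pyGetD ds i 0 - 1)
    -- 'for k in range(i): digits[k] = 9'
    (PySem.List.pyRange 0 i 1).foldl (fun d k => PySem.List.pySetD d k 9) ds1
  else ds

def monotone_digits (num : Int) : Int :=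
  let p := aExtract 11 num (List.replicate 10 0) 0
  let ds := (PySem.List.pyRange 1 p.2 1).foldl aStep p.1
  (PySem.List.pyRange (p.2 - 1) (-1) (-1)).foldl
    (fun ans i => 10 * ans + PySem.List.pyGetD ds i 0) 0

-- ===== PORT B =====
-- 'while x // p // 10 > 0: …; p *= 10' — fuel 11: within Dom the guard fails after
-- at most 10 iterations (p is multiplied by 10 each time and 10*p ≤ x ≤ 2^31 is needed).
def bLoop : Nat → Int → Int → Int
  | 0, x, _ => x
  | f + 1, x, p =>
    if PySem.Int.floordiv (PySem.Int.floordiv x p) 10 > 0 then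
      let x' :=
        if PySem.Int.mod (PySem.Int.floordiv x p) 10 <
           PySem.Int.mod (PySem.Int.floordiv (PySem.Int.floordiv x p) 10) 10 then
          PySem.Int.floordiv x (p * 10) * (p * 10) - 1
        else x
      bLoop f x' (p * 10)
    else x

def monotone_digits_alt (num : Int) : Int := bLoop 11 num 1

-- ===== PRECONDITION & SPEC =====
-- Pre_ excludes exactly the negative inputs, on which A's extraction loop never
-- reaches 0 ('-1 // 10 == -1') and Python raises IndexError at digits[10].
def Pre_monotone_digits (num : Int) : Prop := 0 ≤ num
instance (num : Int) : Decidable (Pre_monotone_digits num) := by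
  unfold Pre_monotone_digits; infer_instance

def pvWitness_monotone_digits : Int := (332)

def Spec_monotone_digits (num : Int) (out : Int) : Prop := out = monotone_digits_alt num
instance (num : Int) (out : Int) : Decidable (Spec_monotone_digits num out) := by
  unfold Spec_monotone_digits; infer_instance

-- ===== CLAIM (what is proved, stated in full; the proofs are below) =====
def Claim_equal_monotone_digits : Prop :=
  ∀ (num : Int), Dom_monotone_digits num → Pre_monotone_digits num →
    Spec_monotone_digits num (monotone_digits num)

-- ===== LEMMAS AND PROOFS =====

-- value of a least-significant-first digit list
def pvVal : List Int → Int
  | [] => 0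
  | d :: ds => d + 10 * pvVal ds

-- least-significant-first digits of a Nat
def pvDigs (n : Nat) : List Int :=
  if h : n = 0 then [] else ((n % 10 : Nat) : Int) :: pvDigs (n / 10)
decreasing_by exact Nat.div_lt_self (Nat.pos_of_ne_zero h) (by norm_num)

-- every entry is a decimal digit
def pvBnd (ds : List Int) : Prop := ∀ d ∈ ds, 0 ≤ d ∧ d ≤ 9

theorem pv_digs_ne_zero {n : Nat} (h : n ≠ 0) :
    pvDigs n = ((n % 10 : Nat) : Int) :: pvDigs (n / 10) := by
  rw [pvDigs]; simp [h]

theorem pv_val_digs (n : Nat) : pvVal (pvDigs n) = n := by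
  induction n using Nat.strong_induction_on with
  | _ n ih =>
    rw [pvDigs]
    by_cases h : n = 0
    · simp [h, pvVal]
    · simp only [h, dite_false, pvVal]
      rw [ih (n / 10) (Nat.div_lt_self (Nat.pos_of_ne_zero h) (by norm_num))]
      push_cast
      omega

theorem pv_bnd_digs (n : Nat) : pvBnd (pvDigs n) := by
  induction n using Nat.strong_induction_on with
  | _ n ih =>
    rw [pvDigs]
    by_cases h : n = 0
    · simp [h, pvBnd]
    · simp only [h, dite_false]
      intro d hd
      rcases List.mem_cons.mp hd with h1 | h1
      · subst h1; constructor <;> [positivity; exact_mod_cast Nat.le_of_lt_succ (Nat.mod_lt n (by norm_num))]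
      · exact ih (n / 10) (Nat.div_lt_self (Nat.pos_of_ne_zero h) (by norm_num)) d h1

theorem pv_len_digs_le (f : Nat) : ∀ n : Nat, n < 10 ^ f → (pvDigs n).length ≤ f := by
  induction f with
  | zero => intro n hn; interval_cases n; simp [pvDigs]
  | succ f ih =>
    intro n hn
    by_cases h : n = 0
    · simp [h, pvDigs]
    · rw [pv_digs_ne_zero h, List.length_cons]
      have : n / 10 < 10 ^ f := by
        rw [Nat.div_lt_iff_lt_mul (by norm_num)]
        calc n < 10 ^ (f + 1) := hn
        _ = 10 ^ f * 10 := by ring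
      exact Nat.succ_le_succ (ih _ this)

theorem pv_digs_top (n : Nat) (h : n ≠ 0) :
    1 ≤ (pvDigs n).getD ((pvDigs n).length - 1) 0 := by
  induction n using Nat.strong_induction_on with
  | _ n ih =>
    rw [pv_digs_ne_zero h]
    by_cases h10 : n / 10 = 0
    · have hlt : n < 10 := by omega
      have : n % 10 = n := Nat.mod_eq_of_lt hlt
      simp [h10, pvDigs, this]
      omega
    · have ht := ih (n / 10) (Nat.div_lt_self (Nat.pos_of_ne_zero h) (by norm_num)) h10
      have hne : pvDigs (n / 10) ≠ [] := by
        rw [pv_digs_ne_zero h10]; simp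
      have hlen : 1 ≤ (pvDigs (n / 10)).length := List.length_pos_iff.mpr hne
      rw [List.length_cons]
      have he : (pvDigs (n / 10)).length + 1 - 1 = ((pvDigs (n / 10)).length - 1) + 1 := by omega
      rw [he, List.getD_cons_succ]
      exact ht

theorem pv_val_nonneg {ds : List Int} (h : pvBnd ds) : 0 ≤ pvVal ds := by
  induction ds with
  | nil => simp [pvVal]
  | cons d t ih =>
    have hd := h d (by simp)
    have ht : pvBnd t := fun x hx => h x (by simp [hx])
    have := ih ht
    simp only [pvVal]; omega

theorem pv_val_lt {ds : List Int} (h : pvBnd ds) : pvVal ds < 10 ^ ds.length := by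
  induction ds with
  | nil => simp [pvVal]
  | cons d t ih =>
    have hd := h d (by simp)
    have ht : pvBnd t := fun x hx => h x (by simp [hx])
    have := ih ht
    simp only [pvVal, List.length_cons, pow_succ]
    omega

theorem pv_val_append (xs ys : List Int) :
    pvVal (xs ++ ys) = pvVal xs + 10 ^ xs.length * pvVal ys := by
  induction xs with
  | nil => simp [pvVal]
  | cons d t ih => simp only [List.cons_append, pvVal, ih, List.length_cons, pow_succ]; ring

theorem pv_val_rep9 (m : Nat) : pvVal (List.replicate m 9) = 10 ^ m - 1 := by
  induction m with
  | zero => simp [pvVal]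
  | succ m ih => rw [List.replicate_succ]; simp only [pvVal, ih, pow_succ]; ring

theorem pv_val_rep0 (m : Nat) : pvVal (List.replicate m 0) = 0 := by
  induction m with
  | zero => simp [pvVal]
  | succ m ih => rw [List.replicate_succ]; simp [pvVal, ih]

theorem pv_val_decomp (ds : List Int) (k : Nat) (h : k ≤ ds.length) :
    pvVal ds = pvVal (ds.take k) + 10 ^ k * pvVal (ds.drop k) := by
  conv_lhs => rw [← List.take_append_drop k ds]
  rw [pv_val_append, List.length_take, min_eq_left h]

theorem pv_dig (j : Nat) : ∀ (ds : List Int), pvBnd ds →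
    pvVal ds / 10 ^ j % 10 = ds.getD j 0 := by
  induction j with
  | zero =>
    intro ds h
    cases ds with
    | nil => simp [pvVal]
    | cons d t =>
      have hd := h d (by simp)
      simp only [pvVal, pow_zero, Int.ediv_one, List.getD_cons_zero]
      rw [Int.add_mul_emod_self_left]
      exact Int.emod_eq_of_lt hd.1 (by omega)
  | succ j ih =>
    intro ds h
    cases ds with
    | nil => simp [pvVal]
    | cons d t =>
      have hd := h d (by simp)
      have ht : pvBnd t := fun x hx => h x (by simp [hx])
      have h1 : pvVal (d :: t) / 10 ^ (j + 1) = pvVal t / 10 ^ j := by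
        rw [pow_succ, mul_comm (10 ^ j : Int) 10, ← Int.ediv_ediv_of_nonneg (by norm_num)]
        congr 1
        simp only [pvVal]
        rw [Int.add_mul_ediv_left _ _ (by norm_num : (10:Int) ≠ 0)]
        rw [Int.ediv_eq_zero_of_lt hd.1 (by omega)]
        ring
      rw [h1, List.getD_cons_succ]
      exact ih t ht

theorem pv_val_ge (k : Nat) : ∀ (ds : List Int), pvBnd ds → 1 ≤ ds.getD k 0 →
    10 ^ k ≤ pvVal ds := by
  induction k with
  | zero =>
    intro ds h h1
    cases ds with
    | nil => simp at h1
    | cons d t =>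
      have ht : pvBnd t := fun x hx => h x (by simp [hx])
      have := pv_val_nonneg ht
      simp only [List.getD_cons_zero] at h1
      simp only [pvVal, pow_zero]; omega
  | succ k ih =>
    intro ds h h1
    cases ds with
    | nil => simp at h1
    | cons d t =>
      have hd := h d (by simp)
      have ht : pvBnd t := fun x hx => h x (by simp [hx])
      simp only [List.getD_cons_succ] at h1
      have := ih t ht h1
      simp only [pvVal, pow_succ]
      omega

theorem pv_val_take_of_zeros : ∀ (ds : List Int) (c : Nat),
    (∀ j : Nat, c ≤ j → ds.getD j 0 = 0) → pvVal ds = pvVal (ds.take c) := by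
  intro ds
  induction ds with
  | nil => simp
  | cons d t ih =>
    intro c h
    cases c with
    | zero =>
      have hd : d = 0 := h 0 (le_refl _)
      have ht : pvVal t = 0 := by
        rw [ih 0 (fun j _ => h (j + 1) (by omega))]
        simp [pvVal]
      simp [pvVal, hd, ht]
    | succ c =>
      simp only [List.take_succ_cons, pvVal]
      rw [ih c (fun j hj => h (j + 1) (by omega))]

theorem pv_val_take_succ (c : Nat) : ∀ (ds : List Int),
    pvVal (ds.take (c + 1)) = pvVal (ds.take c) + 10 ^ c * ds.getD c 0 := by
  induction c with
  | zero =>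
    intro ds
    cases ds with
    | nil => simp [pvVal]
    | cons d t => simp [pvVal]
  | succ c ih =>
    intro ds
    cases ds with
    | nil => simp [pvVal]
    | cons d t =>
      simp only [List.take_succ_cons, pvVal, List.getD_cons_succ, ih t, pow_succ]
      ring

theorem pv_ext (f : Nat) : ∀ (n : Nat) (ds : List Int) (c : Nat),
    n < 10 ^ f → c + (pvDigs n).length ≤ ds.length →
    aExtract f ((n : Nat) : Int) ds ((c : Nat) : Int) =
      (ds.take c ++ pvDigs n ++ ds.drop (c + (pvDigs n).length),
       ((c + (pvDigs n).length : Nat) : Int)) := by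
  induction f with
  | zero =>
    intro n ds c hn hc
    have h0 : n = 0 := by simpa using hn
    subst h0
    simp [aExtract, pvDigs, List.take_append_drop]
  | succ f ih =>
    intro n ds c hn hc
    by_cases h : n = 0
    · subst h
      simp [aExtract, pvDigs, List.take_append_drop]
    · have hne : ((n : Nat) : Int) ≠ 0 := Int.natCast_ne_zero.mpr h
      have hd := pv_digs_ne_zero h
      have hlen1 : (pvDigs n).length = (pvDigs (n / 10)).length + 1 := by
        rw [hd]; simp
      have hclen : c < ds.length := by omega
      simp only [aExtract]
      rw [if_pos hne]
      have hfd : PySem.Int.floordiv ((n : Nat) : Int) 10 = ((n / 10 : Nat) : Int) := by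
        exact_mod_cast PySem.Int.floordiv_natCast n 10
      have hmd : PySem.Int.mod ((n : Nat) : Int) 10 = ((n % 10 : Nat) : Int) := by
        exact_mod_cast PySem.Int.mod_natCast n 10
      rw [hfd, hmd]
      rw [show ((c : Nat) : Int) + 1 = (((c + 1 : Nat)) : Int) by push_cast; ring]
      rw [PySem.List.pySetD_natCast]
      have hn' : n / 10 < 10 ^ f := by
        rw [Nat.div_lt_iff_lt_mul (by norm_num)]
        calc n < 10 ^ (f + 1) := hn
        _ = 10 ^ f * 10 := by ring
      have hc' : (c + 1) + (pvDigs (n / 10)).length ≤ (ds.set c ((n % 10 : Nat) : Int)).length := by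
        rw [List.length_set]; omega
      rw [ih (n / 10) _ (c + 1) hn' hc']
      have hset := List.set_eq_take_cons_drop ((n % 10 : Nat) : Int) hclen
      refine Prod.ext ?_ (by simp only []; push_cast; omega)
      -- first components
      simp only []
      rw [hset]
      have htake : (List.take c ds ++ ((n % 10 : Nat) : Int) :: List.drop (c + 1) ds).take (c + 1) =
          List.take c ds ++ [((n % 10 : Nat) : Int)] := by
        rw [List.take_append]
        rw [List.take_of_length_le (by rw [List.length_take]; omega)]
        rw [List.length_take, min_eq_left (le_of_lt hclen),
            show c + 1 - c = 1 by omega]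
        simp
      have hdrop : (List.take c ds ++ ((n % 10 : Nat) : Int) :: List.drop (c + 1) ds).drop
            ((c + 1) + (pvDigs (n / 10)).length) = ds.drop ((c + 1) + (pvDigs (n / 10)).length) := by
        rw [← hset, List.drop_set]
        rw [if_pos (by omega)]
      rw [htake, hdrop, hd]
      simp only [List.length_cons]
      rw [show c + ((pvDigs (n / 10)).length + 1) = c + 1 + (pvDigs (n / 10)).length by omega]
      simp [List.append_assoc]

theorem pv_fill (m : Nat) : ∀ (ds : List Int), m ≤ ds.length →
    (PySem.List.pyRange 0 (m : Int) 1).foldl (fun d k => PySem.List.pySetD d k 9) ds =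
      List.replicate m 9 ++ ds.drop m := by
  induction m with
  | zero =>
    intro ds _
    rw [show ((0 : Nat) : Int) = 0 by simp, PySem.List.pyRange_one_eq_nil (le_refl 0)]
    simp
  | succ m ih =>
    intro ds h
    have hm : m < ds.length := by omega
    rw [show ((m + 1 : Nat) : Int) = ((m : Nat) : Int) + 1 by push_cast; ring]
    rw [PySem.List.pyRange_one_succ_right (by positivity)]
    rw [List.foldl_append]
    rw [ih ds (le_of_lt hm)]
    simp only [List.foldl_cons, List.foldl_nil]
    rw [PySem.List.pySetD_natCast]
    have hsplit : (List.replicate m 9 ++ ds.drop m : List Int).set m 9 =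
        List.replicate m 9 ++ (ds.drop m).set 0 9 := by
      rw [List.set_append]
      simp
    rw [hsplit, List.drop_eq_getElem_cons hm]
    simp only [List.set_cons_zero]
    rw [show (9 : Int) :: ds.drop (m + 1) = [9] ++ ds.drop (m + 1) by simp,
        ← List.append_assoc, ← List.replicate_succ']

theorem pv_getD_int {ds : List Int} {i : Nat} (hi : 1 ≤ i) :
    PySem.List.pyGetD ds ((i : Nat) : Int) 0 = ds.getD i 0 ∧
    PySem.List.pyGetD ds (((i : Nat) : Int) - 1) 0 = ds.getD (i - 1) 0 := by
  constructor
  · simp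
  · rw [show (((i : Nat) : Int) - 1) = ((i - 1 : Nat) : Int) by omega]
    simp

theorem pv_aStep_false {ds : List Int} {i : Nat} (hi : 1 ≤ i)
    (h : ¬ ds.getD (i - 1) 0 < ds.getD i 0) : aStep ds (i : Int) = ds := by
  obtain ⟨h1, h2⟩ := pv_getD_int (ds := ds) hi
  unfold aStep
  rw [h1, h2, if_neg h]

theorem pv_aStep_true {ds : List Int} {i : Nat} (hi : 1 ≤ i) (hlen : i < ds.length)
    (h : ds.getD (i - 1) 0 < ds.getD i 0) :
    aStep ds (i : Int) = List.replicate i 9 ++ (ds.getD i 0 - 1) :: ds.drop (i + 1) := by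
  obtain ⟨h1, h2⟩ := pv_getD_int (ds := ds) hi
  unfold aStep
  rw [h1, h2, if_pos h]
  rw [PySem.List.pySetD_natCast]
  rw [pv_fill i _ (by rw [List.length_set]; omega)]
  rw [List.drop_set, if_neg (by omega), Nat.sub_self,
      List.drop_eq_getElem_cons hlen, List.set_cons_zero,
      List.getD_eq_getElem _ _ hlen]

theorem pv_getD_high {ds : List Int} {i j : Nat} (v : Int) (h : i + 1 ≤ j) :
    (List.replicate i 9 ++ v :: ds.drop (i + 1)).getD j 0 = ds.getD j 0 := by
  rw [List.getD_eq_getElem?_getD, List.getD_eq_getElem?_getD]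
  rw [List.getElem?_append_right (by simp; omega)]
  rw [show j - (List.replicate i (9 : Int)).length = (j - i - 1) + 1 by simp; omega]
  rw [List.getElem?_cons_succ, List.getElem?_drop]
  congr 2
  omega

theorem pv_main (r : Nat) : ∀ (i f : Nat) (ds : List Int), 1 ≤ i → r + 1 ≤ f →
    ds.length = 10 → i + r ≤ 10 → pvBnd ds →
    (∀ j : Nat, i + r ≤ j → ds.getD j 0 = 0) →
    (r ≠ 0 → 1 ≤ ds.getD (i + r - 1) 0) →
    pvVal ((PySem.List.pyRange (i : Int) ((i : Int) + (r : Int)) 1).foldl aStep ds) =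
      bLoop f (pvVal ds) (10 ^ (i - 1)) ∧
    ∀ j : Nat, i + r ≤ j →
      ((PySem.List.pyRange (i : Int) ((i : Int) + (r : Int)) 1).foldl aStep ds).getD j 0 = 0 := by
  induction r with
  | zero =>
    intro i f ds hi hf hlen hir hb hz _
    rw [show ((i : Int) + ((0 : Nat) : Int)) = (i : Int) by simp]
    rw [PySem.List.pyRange_one_eq_nil (le_refl _)]
    simp only [List.foldl_nil]
    refine ⟨?_, fun j hj => hz j (by omega)⟩
    obtain ⟨f', rfl⟩ : ∃ f', f = f' + 1 := ⟨f - 1, by omega⟩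
    have hx0 : 0 ≤ pvVal ds := pv_val_nonneg hb
    have hxlt : pvVal ds < 10 ^ i := by
      rw [pv_val_take_of_zeros ds i (fun j hj => hz j (by omega))]
      calc pvVal (ds.take i) < 10 ^ (ds.take i).length :=
            pv_val_lt (fun x hx => hb x (List.mem_of_mem_take hx))
      _ ≤ 10 ^ i := by
            apply pow_le_pow_right₀ (by norm_num)
            rw [List.length_take]; omega
    have hp : (0 : Int) < 10 ^ (i - 1) := by positivity
    have h10 : (10 : Int) ^ (i - 1) * 10 = 10 ^ i := by
      rw [← pow_succ]; congr 1; omega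
    simp only [bLoop]
    rw [PySem.Int.floordiv_eq_ediv_of_pos (by norm_num : (0:Int) < 10),
        PySem.Int.floordiv_eq_ediv_of_pos hp,
        Int.ediv_ediv_of_nonneg (le_of_lt hp), h10]
    rw [Int.ediv_eq_zero_of_lt hx0 hxlt]
    norm_num
  | succ r' ih =>
    intro i f ds hi hf hlen hir hb hz ht
    obtain ⟨f', rfl⟩ : ∃ f', f = f' + 1 := ⟨f - 1, by omega⟩
    have hcons : PySem.List.pyRange (i : Int) ((i : Int) + ((r' + 1 : Nat) : Int)) 1 =
        (i : Int) :: PySem.List.pyRange ((i : Int) + 1) ((i : Int) + ((r' + 1 : Nat) : Int)) 1 :=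
      PySem.List.pyRange_one_cons (by push_cast; omega)
    rw [hcons]
    simp only [List.foldl_cons]
    have hilen : i < ds.length := by omega
    have hp : (0 : Int) < 10 ^ (i - 1) := by positivity
    have h10 : (10 : Int) ^ (i - 1) * 10 = 10 ^ i := by
      rw [← pow_succ]; congr 1; omega
    have hx0 : 0 ≤ pvVal ds := pv_val_nonneg hb
    have htop : 1 ≤ ds.getD (i + r') 0 := by
      have := ht (by omega)
      rwa [show i + (r' + 1) - 1 = i + r' by omega] at this
    have hgx : 10 ^ i ≤ pvVal ds := by
      calc (10 : Int) ^ i ≤ 10 ^ (i + r') := by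
            apply pow_le_pow_right₀ (by norm_num); omega
      _ ≤ pvVal ds := pv_val_ge _ _ hb htop
    simp only [bLoop]
    rw [PySem.Int.mod_eq_emod_of_pos (by norm_num : (0:Int) < 10),
        PySem.Int.mod_eq_emod_of_pos (by norm_num : (0:Int) < 10)]
    rw [PySem.Int.floordiv_eq_ediv_of_pos (by norm_num : (0:Int) < 10)]
    rw [PySem.Int.floordiv_eq_ediv_of_pos (by positivity : (0:Int) < 10 ^ (i-1) * 10)]
    simp only [PySem.Int.floordiv_eq_ediv_of_pos hp,
        Int.ediv_ediv_of_nonneg (le_of_lt hp), h10]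
    have hguard : pvVal ds / 10 ^ i > 0 := by
      have h1 : (1 : Int) ≤ pvVal ds / 10 ^ i :=
        (Int.le_ediv_iff_mul_le (by positivity)).mpr (by linarith)
      omega
    rw [if_pos hguard]
    rw [pv_dig (i - 1) ds hb, pv_dig i ds hb]
    by_cases hcond : ds.getD (i - 1) 0 < ds.getD i 0
    · rw [if_pos hcond, pv_aStep_true hi hilen hcond]
      have hprev0 : 0 ≤ ds.getD (i - 1) 0 := by
        rw [List.getD_eq_getElem _ _ (by omega : i - 1 < ds.length)]
        exact (hb _ (List.getElem_mem _)).1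
      have hgmem : ds.getD i 0 ∈ ds := by
        rw [List.getD_eq_getElem _ _ hilen]; exact List.getElem_mem _
      have hgb := hb _ hgmem
      have hdrop : ds.drop i = ds.getD i 0 :: ds.drop (i + 1) := by
        rw [List.drop_eq_getElem_cons hilen, List.getD_eq_getElem _ _ hilen]
      have hbtake : pvBnd (ds.take i) := fun x hx => hb x (List.mem_of_mem_take hx)
      have htklt : pvVal (ds.take i) < 10 ^ i := by
        calc pvVal (ds.take i) < 10 ^ (ds.take i).length := pv_val_lt hbtake
        _ ≤ 10 ^ i := by
              apply pow_le_pow_right₀ (by norm_num)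
              rw [List.length_take]; omega
      have htk0 : 0 ≤ pvVal (ds.take i) := pv_val_nonneg hbtake
      have hdecomp : pvVal ds = pvVal (ds.take i) + 10 ^ i * pvVal (ds.drop i) :=
        pv_val_decomp ds i (le_of_lt hilen)
      have hmod : pvVal ds % 10 ^ i = pvVal (ds.take i) := by
        rw [hdecomp, Int.add_mul_emod_self_left]
        exact Int.emod_eq_of_lt htk0 htklt
      have hdiv : pvVal ds / 10 ^ i * 10 ^ i = pvVal ds - pvVal (ds.take i) := by
        have h1 := Int.mul_ediv_add_emod (pvVal ds) (10 ^ i)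
        rw [hmod] at h1
        linarith [h1]
      have hxval : pvVal ds / 10 ^ i * 10 ^ i - 1 =
          pvVal (List.replicate i 9 ++ (ds.getD i 0 - 1) :: ds.drop (i + 1)) := by
        rw [hdiv, pv_val_append, pv_val_rep9, List.length_replicate]
        simp only [pvVal]
        rw [hdecomp, hdrop]
        simp only [pvVal]
        ring
      have hlen' : (List.replicate i 9 ++ (ds.getD i 0 - 1) :: ds.drop (i + 1)).length = 10 := by
        simp [List.length_replicate, List.length_drop, hlen]
        omega
      have hb' : pvBnd (List.replicate i 9 ++ (ds.getD i 0 - 1) :: ds.drop (i + 1)) := by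
        intro x hx
        rcases List.mem_append.mp hx with h1 | h1
        · rw [List.eq_of_mem_replicate h1]; norm_num
        · rcases List.mem_cons.mp h1 with h2 | h2
          · subst h2; omega
          · exact hb x (List.mem_of_mem_drop h2)
      have hz' : ∀ j : Nat, (i + 1) + r' ≤ j →
          (List.replicate i 9 ++ (ds.getD i 0 - 1) :: ds.drop (i + 1)).getD j 0 = 0 := by
        intro j hj
        rw [pv_getD_high _ (by omega)]
        exact hz j (by omega)
      have ht' : r' ≠ 0 → 1 ≤ (List.replicate i 9 ++ (ds.getD i 0 - 1) :: ds.drop (i + 1)).getD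
          ((i + 1) + r' - 1) 0 := by
        intro hr0
        rw [pv_getD_high _ (by omega)]
        rw [show (i + 1) + r' - 1 = i + r' by omega]
        exact htop
      have hmain := ih (i + 1) f' _ (by omega) (by omega) hlen' (by omega) hb' hz' ht'
      have e1 : ((i : Int) + 1) = (((i + 1 : Nat)) : Int) := by push_cast; ring
      have e2 : ((i : Int) + ((r' + 1 : Nat) : Int)) = (((i + 1 : Nat)) : Int) + ((r' : Nat) : Int) := by
        push_cast; ring
      have hpow : (10 : Int) ^ ((i + 1) - 1) = 10 ^ i := by simp
      rw [e1, e2]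
      refine ⟨?_, fun j hj => hmain.2 j (by omega)⟩
      rw [hmain.1, hpow, ← hxval]
    · rw [if_neg hcond, pv_aStep_false hi hcond]
      have hz' : ∀ j : Nat, (i + 1) + r' ≤ j → ds.getD j 0 = 0 := fun j hj => hz j (by omega)
      have ht' : r' ≠ 0 → 1 ≤ ds.getD ((i + 1) + r' - 1) 0 := by
        intro hr0
        rw [show (i + 1) + r' - 1 = i + r' by omega]
        exact htop
      have hmain := ih (i + 1) f' ds (by omega) (by omega) hlen (by omega) hb hz' ht'
      have e1 : ((i : Int) + 1) = (((i + 1 : Nat)) : Int) := by push_cast; ring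
      have e2 : ((i : Int) + ((r' + 1 : Nat) : Int)) = (((i + 1 : Nat)) : Int) + ((r' : Nat) : Int) := by
        push_cast; ring
      have hpow : (10 : Int) ^ ((i + 1) - 1) = 10 ^ i := by simp
      rw [e1, e2]
      refine ⟨?_, fun j hj => hmain.2 j (by omega)⟩
      rw [hmain.1, hpow]

theorem pv_recon (c : Nat) : ∀ (a : Int) (ds : List Int),
    (PySem.List.pyRange ((c : Int) - 1) (-1) (-1)).foldl
      (fun ans i => 10 * ans + PySem.List.pyGetD ds i 0) a = a * 10 ^ c + pvVal (ds.take c) := by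
  induction c with
  | zero =>
    intro a ds
    rw [show ((0 : Nat) : Int) - 1 = -1 by simp,
        PySem.List.pyRange_neg_one_eq_nil (le_refl _)]
    simp [pvVal]
  | succ c ih =>
    intro a ds
    rw [show ((c + 1 : Nat) : Int) - 1 = ((c : Nat) : Int) by push_cast; ring]
    rw [PySem.List.pyRange_neg_one_cons (by omega : (-1 : Int) < (c : Nat))]
    simp only [List.foldl_cons]
    rw [ih (10 * a + PySem.List.pyGetD ds ((c : Nat) : Int) 0) ds]
    rw [PySem.List.pyGetD_natCast]
    rw [pv_val_take_succ, pow_succ]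
    ring

theorem pv_assemble (n : Nat) (h0 : n ≠ 0) (hn31 : n ≤ 2147483648) :
    monotone_digits ((n : Nat) : Int) = monotone_digits_alt ((n : Nat) : Int) := by
  have hn10 : n < 10 ^ 10 := by norm_num; omega
  have hn11 : n < 10 ^ 11 := by norm_num; omega
  have hL10 : (pvDigs n).length ≤ 10 := pv_len_digs_le 10 n hn10
  have hL1 : 1 ≤ (pvDigs n).length := by rw [pv_digs_ne_zero h0]; simp
  set L := (pvDigs n).length with hL
  have hext := pv_ext 11 n (List.replicate 10 0) 0 hn11 (by rw [List.length_replicate]; omega)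
  simp only [Nat.cast_zero, List.take_zero, List.nil_append, zero_add,
    List.drop_replicate] at hext
  set ds0 : List Int := pvDigs n ++ List.replicate (10 - L) 0 with hds0
  have hlen0 : ds0.length = 10 := by rw [hds0]; simp; omega
  have hb0 : pvBnd ds0 := by
    intro x hx
    rcases List.mem_append.mp hx with h1 | h1
    · exact pv_bnd_digs n x h1
    · rw [List.eq_of_mem_replicate h1]; norm_num
  have hz0 : ∀ j : Nat, L ≤ j → ds0.getD j 0 = 0 := by
    intro j hj
    rw [hds0, List.getD_eq_getElem?_getD, List.getElem?_append_right (by omega)]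
    rw [List.getElem?_replicate]
    split <;> simp
  have ht0 : 1 ≤ ds0.getD (L - 1) 0 := by
    rw [hds0, List.getD_eq_getElem?_getD, List.getElem?_append_left (by omega)]
    rw [← List.getD_eq_getElem?_getD]
    exact pv_digs_top n h0
  have hmain := pv_main (L - 1) 1 11 ds0 (le_refl 1) (by omega) hlen0 (by omega) hb0
    (fun j hj => hz0 j (by omega)) (fun _ => by
      rw [show 1 + (L - 1) - 1 = L - 1 by omega]; exact ht0)
  have er : ((1 : Nat) : Int) + ((L - 1 : Nat) : Int) = ((L : Nat) : Int) := by push_cast; omega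
  rw [er] at hmain
  have hval0 : pvVal ds0 = ((n : Nat) : Int) := by
    rw [hds0, pv_val_append, pv_val_rep0, pv_val_digs]; ring
  rw [hval0] at hmain
  simp only [Nat.cast_one] at hmain
  have hzf := hmain.2
  unfold monotone_digits monotone_digits_alt
  rw [hext]
  simp only []
  rw [pv_recon L 0 _]
  rw [zero_mul, zero_add]
  rw [← pv_val_take_of_zeros _ L (fun j hj => hzf j (by omega))]
  exact hmain.1

-- ===== VERDICT (by name: the statement is the Claim_ definition above) =====
theorem monotone_digits_spec : Claim_equal_monotone_digits := by
  intro num hdom hpre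
  unfold Spec_monotone_digits
  obtain ⟨n, rfl⟩ : ∃ n : Nat, num = ((n : Nat) : Int) :=
    ⟨num.toNat, (Int.toNat_of_nonneg hpre).symm⟩
  have hn31 : n ≤ 2147483648 := by
    unfold Dom_monotone_digits pvDomInt at hdom
    simp only [decide_eq_true_eq] at hdom
    omega
  by_cases h0 : n = 0
  · subst h0; decide
  · exact pv_assemble n h0 hn31
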